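-- pv_equiv track=rewrite | github.com/Mystified131/PracticingFlask | PracticeControl.py | proclist
-- ===== SOURCE A (Python) =====
-- def proclist(instr):
--     instr = instr.lower()
--     instrb = ""
--     for elem in instr:
--         if elem.isalpha() or elem == " ":
--             instrb += elem
--     anslist = []
--     anslist = instrb.split()
--     anslistb = list(set(anslist))
--     anslistb.sort()
--     return anslistb
-- ===== SOURCE B (Python) =====
-- def proclist(instr):
--     result = set()
--     buf = []
--     for ch in instr.lower():
--         if ch.isalpha():
--             buf.append(ch)
--         elif ch == " ":
--             if buf:
--                 result.add("".join(buf))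
--                 buf = []
--         # any other character is skipped without breaking the current word
--     if buf:
--         result.add("".join(buf))
--     return sorted(result)
-- ===== Notes on version B (the rewrite author's own statement) =====
-- stated objective: alternative
-- what changed: B makes a single pass that builds each word directly in a character buffer and flushes it into a result set on spaces, instead of A's building a filtered copy of the whole string and then splitting it into words.
import Mathlib
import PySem

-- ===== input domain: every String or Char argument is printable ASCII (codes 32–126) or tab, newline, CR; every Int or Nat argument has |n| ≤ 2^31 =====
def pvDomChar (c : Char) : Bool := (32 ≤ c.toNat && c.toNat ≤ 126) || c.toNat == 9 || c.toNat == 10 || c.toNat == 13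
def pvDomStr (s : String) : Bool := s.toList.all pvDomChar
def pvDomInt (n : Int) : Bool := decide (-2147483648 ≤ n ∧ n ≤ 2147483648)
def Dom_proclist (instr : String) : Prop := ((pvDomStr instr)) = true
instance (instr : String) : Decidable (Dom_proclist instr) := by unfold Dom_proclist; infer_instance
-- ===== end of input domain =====

-- B replaces A's filter-whole-string-then-split pipeline by a single pass that builds each
-- word in a buffer and flushes it into a set on spaces (objective: alternative decomposition).

-- ===== PORT A =====
def proclist (instr : String) : List String :=
  let instr2 := PySem.Str.lower instr
  let instrb := instr2.toList.foldl
    (fun acc c => if PySem.Chars.isalpha c || c == ' ' then acc.push c else acc) ""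
  let anslist := PySem.Str.split₀ instrb
  let anslistb := PySem.Set.ofList anslist
  PySem.List.sorted anslistb (fun x => x) false

-- ===== PORT B =====
def altStep (st : PySem.Set String × List Char) (c : Char) : PySem.Set String × List Char :=
  if PySem.Chars.isalpha c then (st.1, st.2 ++ [c])
  else if c == ' ' then
    (if st.2.isEmpty then st else (PySem.Set.add st.1 (String.ofList st.2), ([] : List Char)))
  else st

def proclist_alt (instr : String) : List String :=
  let st := (PySem.Str.lower instr).toList.foldl altStep (PySem.Set.empty, ([] : List Char))
  let res := if st.2.isEmpty then st.1 else PySem.Set.add st.1 (String.ofList st.2)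
  PySem.List.sorted res (fun x => x) false

-- ===== PRECONDITION & SPEC =====
def Spec_proclist (instr : String) (out : List String) : Prop := out = proclist_alt instr
instance (instr : String) (out : List String) : Decidable (Spec_proclist instr out) := by unfold Spec_proclist; infer_instance

-- ===== CLAIM (what is proved, stated in full; the proofs are below) =====
def Claim_equal_proclist : Prop := ∀ (instr : String), Dom_proclist instr → Spec_proclist instr (proclist instr)

-- ===== LEMMAS AND PROOFS =====

-- A's filter-accumulating fold over the string builds exactly the filtered character list.
theorem foldl_push_filter (l : List Char) (a : String) :
    (l.foldl (fun acc c => if PySem.Chars.isalpha c || c == ' ' then acc.push c else acc) a).toList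
      = a.toList ++ l.filter (fun c => PySem.Chars.isalpha c || c == ' ') := by
  induction l generalizing a with
  | nil => simp
  | cons c l ih =>
    by_cases h : (PySem.Chars.isalpha c || c == ' ') = true
    · rw [List.foldl_cons, if_pos h, ih, String.toList_push]
      simp [h]
    · have hb : (PySem.Chars.isalpha c || c == ' ') = false := by simpa using h
      rw [List.foldl_cons, if_neg h, ih]
      simp [hb]

-- split₀.go with a nonempty accumulator just prepends the already-collected words.
theorem go_acc (l cur : List Char) (acc : List (List Char)) :
    PySem.Chars.split₀.go l cur acc = acc.reverse ++ PySem.Chars.split₀.go l cur [] := by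
  induction l generalizing cur acc with
  | nil =>
    simp only [PySem.Chars.split₀.go]
    by_cases h : cur.isEmpty
    · simp [h]
    · simp [h]
  | cons c l ih =>
    by_cases hs : PySem.Chars.isspace c
    · by_cases h : cur.isEmpty
      · simp only [PySem.Chars.split₀.go, hs, h, if_true]
        exact ih [] acc
      · simp only [PySem.Chars.split₀.go, hs, h, if_true, Bool.false_eq_true, if_false]
        rw [ih [] (cur.reverse :: acc), ih [] [cur.reverse]]
        simp
    · simp only [PySem.Chars.split₀.go, hs, Bool.false_eq_true, if_false]
      exact ih (c :: cur) acc

theorem isspace_space : PySem.Chars.isspace ' ' = true := by decide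

theorem char_toNat_le (c d : Char) (h : c ≤ d) : c.toNat ≤ d.toNat := by
  simp only [Char.le_def, Char.toNat] at *
  exact UInt32.le_iff_toNat_le.mp h

theorem not_isspace_of_isalpha (c : Char) (h : PySem.Chars.isalpha c = true) :
    PySem.Chars.isspace c = false := by
  simp only [PySem.Chars.isalpha, PySem.Chars.isupper, PySem.Chars.islower, Bool.or_eq_true,
    Bool.and_eq_true, decide_eq_true_eq] at h
  simp only [PySem.Chars.isspace, Bool.or_eq_false_iff, Bool.and_eq_false_iff,
    decide_eq_false_iff_not]
  rcases h with ⟨h1, h2⟩ | ⟨h1, h2⟩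
  · have lo : 65 ≤ c.toNat := char_toNat_le 'A' c h1
    have hi : c.toNat ≤ 90 := char_toNat_le c 'Z' h2
    omega
  · have lo : 97 ≤ c.toNat := char_toNat_le 'a' c h1
    have hi : c.toNat ≤ 122 := char_toNat_le c 'z' h2
    omega

-- Main invariant: B's single pass over the raw characters produces the same set as
-- folding Set.add over the words split₀ extracts from the filtered characters.
theorem main_inv (l : List Char) (s : PySem.Set String) (buf : List Char) :
    (let st := l.foldl altStep (s, buf)
     if st.2.isEmpty then st.1 else PySem.Set.add st.1 (String.ofList st.2))
      = List.foldl PySem.Set.add s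
          (List.map String.ofList
            (PySem.Chars.split₀.go (l.filter (fun c => PySem.Chars.isalpha c || c == ' '))
              buf.reverse [])) := by
  induction l generalizing s buf with
  | nil =>
    simp only [List.foldl_nil, List.filter_nil, PySem.Chars.split₀.go, List.isEmpty_reverse]
    by_cases h : buf.isEmpty
    · simp [h]
    · simp [h]
  | cons c l ih =>
    simp only [List.foldl_cons, List.filter_cons]
    by_cases ha : PySem.Chars.isalpha c
    · have hns := not_isspace_of_isalpha c ha
      simp only [ha, Bool.true_or, if_true, altStep, PySem.Chars.split₀.go, hns,
        Bool.false_eq_true, if_false]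
      rw [ih]
      simp
    · by_cases hsp : c = ' '
      · subst hsp
        simp only [ha, Bool.false_or, altStep, Bool.false_eq_true, if_false,
          beq_self_eq_true, if_true, PySem.Chars.split₀.go, isspace_space,
          List.isEmpty_reverse]
        by_cases hb : buf.isEmpty
        · simp only [hb, if_true]
          rw [ih]
          simp [List.isEmpty_iff.mp hb]
        · simp only [hb, Bool.false_eq_true, if_false]
          rw [go_acc (List.filter (fun c => PySem.Chars.isalpha c || c == ' ') l) [] [buf.reverse.reverse]]
          rw [ih]
          simp
      · have hc : (c == ' ') = false := by simpa using hsp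
        simp only [ha, hc, Bool.false_or, Bool.false_eq_true, if_false, altStep]
        exact ih s buf

-- ===== VERDICT (by name: the statement is the Claim_ definition above) =====
theorem proclist_spec : Claim_equal_proclist := by
  intro instr _
  unfold Spec_proclist proclist proclist_alt
  simp only [PySem.Str.split₀, PySem.Set.ofList_eq_foldl, foldl_push_filter]
  have h := main_inv (PySem.Str.lower instr).toList PySem.Set.empty []
  simp only [List.reverse_nil] at h
  rw [h]
  rfl
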